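-- pv_equiv track=rewrite | github.com/pypi-data/pypi-mirror-403 | packages/mircat-v2/mircat_v2-1.0.8.tar.gz/mircat_v2-1.0.8/src/mircat_v2/dbase.py | _parse_columns_from_definition
-- ===== SOURCE A (Python) =====
-- def _parse_columns_from_definition(table_def: str) -> dict[str, str]:
--     """Parse column definitions from a table definition string.
--
--     Returns a dict mapping column name to column type/definition.
--     """
--     columns = {}
--     # Split by comma, but be careful with CHECK constraints that contain commas
--     parts = []
--     depth = 0
--     current = ""
--     for char in table_def:
--         if char == "(":
--             depth += 1
--         elif char == ")":
--             depth -= 1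
--         elif char == "," and depth == 0:
--             parts.append(current.strip())
--             current = ""
--             continue
--         current += char
--     if current.strip():
--         parts.append(current.strip())
--
--     for part in parts:
--         part = part.strip()
--         # Skip PRIMARY KEY constraints
--         if part.upper().startswith("PRIMARY KEY"):
--             continue
--         # Skip FOREIGN KEY constraints
--         if part.upper().startswith("FOREIGN KEY"):
--             continue
--         # Parse column definition
--         tokens = part.split(None, 1)
--         if len(tokens) >= 2:
--             col_name = tokens[0]
--             col_type = tokens[1]
--             columns[col_name] = col_type
--
--     return columns
-- ===== SOURCE B (Python) =====
-- def _parse_columns_from_definition(table_def: str) -> dict[str, str]: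
--     """Parse column definitions from a table definition string.
--
--     Split naively on every comma first, then rebuild the top-level parts by
--     re-merging fragments (with ',') while the running parenthesis balance is
--     non-zero; finally read each part as 'name type'.
--     """
--     frags = table_def.split(",")
--     parts = []
--     buf = frags[0]
--     bal = buf.count("(") - buf.count(")")
--     for frag in frags[1:]:
--         if bal == 0:
--             parts.append(buf.strip())
--             buf = frag
--         else:
--             buf = buf + "," + frag
--         bal += frag.count("(") - frag.count(")")
--     if buf.strip():
--         parts.append(buf.strip())
--
--     columns = {}
--     for part in parts:
--         u = part.upper()
--         if not (u.startswith("PRIMARY KEY") or u.startswith("FOREIGN KEY")):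
--             tokens = part.split(None, 1)
--             if len(tokens) > 1:
--                 columns[tokens[0]] = tokens[1]
--     return columns
-- ===== Notes on version B (the rewrite author's own statement) =====
-- stated objective: faster
-- what changed: Replaces A's character-by-character depth-tracking scanner (per-char Python loop with repeated string concatenation) with one C-level str.split on every comma followed by a balance-driven re-merge of the fragments, and fuses A's two skip-checks into one filtered dict-building loop.
import Mathlib
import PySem

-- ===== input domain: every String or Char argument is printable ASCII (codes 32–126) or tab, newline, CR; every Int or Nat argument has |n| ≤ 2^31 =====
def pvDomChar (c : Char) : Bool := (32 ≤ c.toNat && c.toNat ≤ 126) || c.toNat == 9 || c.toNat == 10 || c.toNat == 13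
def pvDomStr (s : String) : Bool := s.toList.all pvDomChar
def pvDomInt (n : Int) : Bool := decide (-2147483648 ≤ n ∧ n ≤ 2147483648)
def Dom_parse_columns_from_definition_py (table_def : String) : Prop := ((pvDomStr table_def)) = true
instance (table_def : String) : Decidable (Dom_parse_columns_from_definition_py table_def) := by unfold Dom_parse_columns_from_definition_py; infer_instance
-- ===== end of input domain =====

-- B replaces A's character-by-character depth scanner by a naive comma split followed by a
-- balance-driven re-merge of the fragments (objective: faster by constant factor, measured).

-- ===== PORT A =====
-- the char loop: state (parts, depth, current); ',' at depth 0 emits current.strip()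
def pvAScan : List (List Char) → Int → List Char → List Char → List (List Char) × Int × List Char
  | parts, depth, cur, [] => (parts, depth, cur)
  | parts, depth, cur, c :: rest =>
    if c = '(' then pvAScan parts (depth + 1) (cur ++ [c]) rest
    else if c = ')' then pvAScan parts (depth - 1) (cur ++ [c]) rest
    else if c = ',' ∧ depth = 0 then pvAScan (parts ++ [PySem.Chars.strip cur]) depth [] rest
    else pvAScan parts depth (cur ++ [c]) rest

-- the second loop of A: skip PRIMARY/FOREIGN KEY parts, split each part on whitespace once
def pvAColumns (parts : List (List Char)) : PySem.Dict (List Char) (List Char) :=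
  parts.foldl (fun columns part0 =>
    let part := PySem.Chars.strip part0
    if PySem.Chars.startswith (PySem.Chars.upper part) "PRIMARY KEY".toList then columns
    else if PySem.Chars.startswith (PySem.Chars.upper part) "FOREIGN KEY".toList then columns
    else
      match PySem.Chars.split₀Max part 1 with
      | t0 :: t1 :: _ => columns.insert t0 t1
      | _ => columns) PySem.Dict.empty

def parse_columns_from_definition_py (table_def : String) : List (String × String) :=
  let st := pvAScan [] 0 [] table_def.toList
  let parts := if PySem.Chars.strip st.2.2 = [] then st.1 else st.1 ++ [PySem.Chars.strip st.2.2]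
  ((pvAColumns parts).items).map (fun p => (String.ofList p.1, String.ofList p.2))

-- ===== PORT B =====
-- frag.count('(') - frag.count(')')  (single-character needles: Python str.count = List.count)
def pvCnt (f : List Char) : Int := (f.count '(' : Int) - (f.count ')' : Int)

-- Source B's loop over frags[1:]: emit buf at balance 0, otherwise re-merge 'buf + "," + frag'
def pvBLoop : List (List Char) → Int → List Char → List (List Char) → List (List Char) × List Char
  | parts, _, buf, [] => (parts, buf)
  | parts, bal, buf, f :: rest =>
    if bal = 0 then pvBLoop (parts ++ [PySem.Chars.strip buf]) (bal + pvCnt f) f rest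
    else pvBLoop parts (bal + pvCnt f) (buf ++ ',' :: f) rest

-- Source B's single filtered loop building the dict
def pvBColumns (parts : List (List Char)) : PySem.Dict (List Char) (List Char) :=
  parts.foldl (fun columns part =>
    let u := PySem.Chars.upper part
    if PySem.Chars.startswith u "PRIMARY KEY".toList || PySem.Chars.startswith u "FOREIGN KEY".toList then
      columns
    else
      match PySem.Chars.split₀Max part 1 with
      | t0 :: t1 :: _ => columns.insert t0 t1
      | _ => columns) PySem.Dict.empty

def parse_columns_from_definition_py_alt (table_def : String) : List (String × String) :=
  -- table_def.split(',') : for a one-character separator Python's str.split is exactly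
  -- List.splitOn ',' on the code points (split at every comma, empty pieces kept)
  match table_def.toList.splitOn ',' with
  | [] => []  -- unreachable: str.split never returns an empty list
  | f0 :: rest =>
    let st := pvBLoop [] (pvCnt f0) f0 rest
    let parts := if PySem.Chars.strip st.2 = [] then st.1 else st.1 ++ [PySem.Chars.strip st.2]
    ((pvBColumns parts).items).map (fun p => (String.ofList p.1, String.ofList p.2))

-- ===== PRECONDITION & SPEC =====
def Spec_parse_columns_from_definition_py (table_def : String) (out : List (String × String)) : Prop := out = parse_columns_from_definition_py_alt table_def
instance (table_def : String) (out : List (String × String)) : Decidable (Spec_parse_columns_from_definition_py table_def out) := by unfold Spec_parse_columns_from_definition_py; infer_instance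

-- ===== CLAIM (what is proved, stated in full; the proofs are below) =====
def Claim_equal_parse_columns_from_definition_py : Prop := ∀ (table_def : String), Dom_parse_columns_from_definition_py table_def → Spec_parse_columns_from_definition_py table_def (parse_columns_from_definition_py table_def)

-- ===== LEMMAS AND PROOFS =====

-- the text a fragment list came from: f₀,f₁,…  (pvGlue is the part after the first comma)
def pvGlue : List (List Char) → List Char
  | [] => []
  | f :: rest => ',' :: f ++ pvGlue rest

def pvRecon : List (List Char) → List Char
  | [] => []
  | f0 :: rest => f0 ++ pvGlue rest

theorem pvRecon_splitOnP (cs : List Char) : pvRecon (cs.splitOnP (· == ',')) = cs := by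
  induction cs with
  | nil => simp [List.splitOnP_nil, pvRecon, pvGlue]
  | cons c cs ih =>
    obtain ⟨f0, rest, h⟩ := List.exists_cons_of_ne_nil (List.splitOnP_ne_nil (· == ',') cs)
    rw [List.splitOnP_cons]
    by_cases hc : c = ','
    · simp only [hc, BEq.rfl, if_pos]
      rw [h] at ih ⊢
      simpa [pvRecon, pvGlue] using congrArg (',' :: ·) ih
    · have : (c == ',') = false := by simp [hc]
      rw [this]
      simp only [Bool.false_eq_true, if_false]
      rw [h] at ih ⊢
      simpa [pvRecon, pvGlue, List.modifyHead] using congrArg (c :: ·) ih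

theorem pv_mem_splitOnP_no_comma (cs : List Char) :
    ∀ f ∈ cs.splitOnP (· == ','), ',' ∉ f := by
  induction cs with
  | nil => intro f hf; simp [List.splitOnP_nil] at hf; simp [hf]
  | cons c cs ih =>
    intro f hf
    rw [List.splitOnP_cons] at hf
    by_cases hc : c = ','
    · simp only [hc, BEq.rfl, if_pos, List.mem_cons] at hf
      rcases hf with h | h
      · simp [h]
      · exact ih f h
    · have hb : (c == ',') = false := by simp [hc]
      rw [hb] at hf
      simp only [Bool.false_eq_true, if_false] at hf
      obtain ⟨f0, rest, h⟩ := List.exists_cons_of_ne_nil (List.splitOnP_ne_nil (· == ',') cs)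
      rw [h] at hf
      simp only [List.modifyHead, List.mem_cons] at hf
      rcases hf with h' | h'
      · subst h'
        intro hmem
        rcases List.mem_cons.mp hmem with h'' | h''
        · exact hc h''.symm
        · exact ih f0 (h ▸ List.mem_cons_self) h''
      · exact ih f (h ▸ List.mem_cons_of_mem _ h')

theorem pvAScan_append (xs ys : List Char) : ∀ (parts : List (List Char)) (d : Int) (cur : List Char),
    pvAScan parts d cur (xs ++ ys)
      = pvAScan (pvAScan parts d cur xs).1 (pvAScan parts d cur xs).2.1 (pvAScan parts d cur xs).2.2 ys := by
  induction xs with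
  | nil => intro parts d cur; simp [pvAScan]
  | cons c xs ih =>
    intro parts d cur
    simp only [List.cons_append, pvAScan]
    split_ifs <;> apply ih

theorem pvAScan_no_comma (f : List Char) (hf : ',' ∉ f) :
    ∀ (parts : List (List Char)) (d : Int) (cur : List Char),
    pvAScan parts d cur f = (parts, d + pvCnt f, cur ++ f) := by
  induction f with
  | nil => intro parts d cur; simp [pvAScan, pvCnt]
  | cons c f ih =>
    intro parts d cur
    have hc : c ≠ ',' := fun h => hf (h ▸ List.mem_cons_self)
    have hf' : ',' ∉ f := fun h => hf (List.mem_cons_of_mem _ h)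
    by_cases h1 : c = '('
    · subst h1
      simp [pvAScan, ih hf', pvCnt, List.count_cons]
      omega
    · by_cases h2 : c = ')'
      · subst h2
        simp [pvAScan, ih hf', pvCnt, List.count_cons]
        omega
      · have h3 : ¬ (c = ',' ∧ d = 0) := fun h => hc h.1
        simp [pvAScan, h1, h2, h3, ih hf', pvCnt, List.count_cons]

theorem pvAScan_comma (parts : List (List Char)) (d : Int) (cur rest : List Char) :
    pvAScan parts d cur (',' :: rest)
      = if d = 0 then pvAScan (parts ++ [PySem.Chars.strip cur]) d [] rest
        else pvAScan parts d (cur ++ [',']) rest := by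
  simp [pvAScan]

theorem pv_loop_eq (fr : List (List Char)) (hfr : ∀ f ∈ fr, ',' ∉ f) :
    ∀ (parts : List (List Char)) (bal : Int) (buf : List Char),
    (pvAScan parts bal buf (pvGlue fr)).1 = (pvBLoop parts bal buf fr).1 ∧
    (pvAScan parts bal buf (pvGlue fr)).2.2 = (pvBLoop parts bal buf fr).2 := by
  induction fr with
  | nil => intro parts bal buf; simp [pvGlue, pvAScan, pvBLoop]
  | cons f rest ih =>
    intro parts bal buf
    have hf : ',' ∉ f := hfr f List.mem_cons_self
    have hrest : ∀ g ∈ rest, ',' ∉ g := fun g hg => hfr g (List.mem_cons_of_mem _ hg)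
    have ih' := ih hrest
    simp only [pvGlue, List.cons_append]
    by_cases hb : bal = 0
    · subst hb
      rw [pvAScan_comma, if_pos rfl]
      rw [pvAScan_append, pvAScan_no_comma f hf]
      simp only [List.nil_append]
      simp only [pvBLoop, if_pos rfl]
      exact ih' _ _ _
    · rw [pvAScan_comma, if_neg hb]
      rw [pvAScan_append, pvAScan_no_comma f hf]
      simp only [pvBLoop, if_neg hb]
      have : buf ++ [','] ++ f = buf ++ ',' :: f := by simp
      rw [this]
      exact ih' _ _ _

-- strip is idempotent
theorem pv_dropWhile_idem (p : Char → Bool) (l : List Char) :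
    List.dropWhile p (List.dropWhile p l) = List.dropWhile p l := by
  induction l with
  | nil => rfl
  | cons c l ih =>
    by_cases h : p c = true
    · have h' : List.dropWhile p (c :: l) = List.dropWhile p l :=
        List.dropWhile_cons_of_pos h
      rw [h', ih]
    · have h' : List.dropWhile p (c :: l) = c :: l :=
        List.dropWhile_cons_of_neg h
      rw [h', h']

theorem pv_rstrip_idem (s : List Char) :
    PySem.Chars.rstrip (PySem.Chars.rstrip s) = PySem.Chars.rstrip s := by
  simp [PySem.Chars.rstrip, pv_dropWhile_idem]

theorem pv_lstrip_rstrip (s : List Char)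
    (hs : List.dropWhile PySem.Chars.isspace s = s) :
    PySem.Chars.lstrip (PySem.Chars.rstrip s) = PySem.Chars.rstrip s := by
  have hpre : PySem.Chars.rstrip s <+: s := by
    have hsuf : List.dropWhile PySem.Chars.isspace s.reverse <:+ s.reverse :=
      List.dropWhile_suffix _
    have hrev : (List.dropWhile PySem.Chars.isspace s.reverse).reverse <+: s.reverse.reverse :=
      List.reverse_prefix.mpr hsuf
    simpa [PySem.Chars.rstrip] using hrev
  rw [PySem.Chars.lstrip]
  cases hr : PySem.Chars.rstrip s with
  | nil => simp
  | cons c z =>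
    rw [hr] at hpre
    obtain ⟨u, hu⟩ := hpre
    have hcs : s = c :: (z ++ u) := by rw [← hu]; simp
    have hnsp : ¬ PySem.Chars.isspace c = true := by
      intro hsp
      rw [hcs] at hs
      rw [List.dropWhile_cons_of_pos hsp] at hs
      have hle := List.length_dropWhile_le (p := PySem.Chars.isspace) (l := z ++ u)
      rw [hs] at hle
      simp at hle
    simp [List.dropWhile_cons_of_neg hnsp]

theorem pv_strip_idem (s : List Char) :
    PySem.Chars.strip (PySem.Chars.strip s) = PySem.Chars.strip s := by
  have hl : List.dropWhile PySem.Chars.isspace (PySem.Chars.lstrip s) = PySem.Chars.lstrip s := by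
    rw [PySem.Chars.lstrip]
    exact pv_dropWhile_idem _ s
  calc PySem.Chars.strip (PySem.Chars.strip s)
      = PySem.Chars.rstrip (PySem.Chars.lstrip (PySem.Chars.rstrip (PySem.Chars.lstrip s))) := rfl
    _ = PySem.Chars.rstrip (PySem.Chars.rstrip (PySem.Chars.lstrip s)) := by
        rw [pv_lstrip_rstrip _ hl]
    _ = PySem.Chars.rstrip (PySem.Chars.lstrip s) := pv_rstrip_idem _
    _ = PySem.Chars.strip s := rfl

-- every part pvBLoop accumulates is stripped
theorem pvBLoop_parts_stripped (fr : List (List Char)) :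
    ∀ (parts : List (List Char)) (bal : Int) (buf : List Char),
    (∀ p ∈ parts, PySem.Chars.strip p = p) →
    ∀ p ∈ (pvBLoop parts bal buf fr).1, PySem.Chars.strip p = p := by
  induction fr with
  | nil => intro parts bal buf h; simpa [pvBLoop] using h
  | cons f rest ih =>
    intro parts bal buf h
    simp only [pvBLoop]
    split_ifs with hb
    · apply ih
      intro p hp
      rcases List.mem_append.mp hp with h' | h'
      · exact h p h'
      · simp only [List.mem_singleton] at h'
        subst h'
        exact pv_strip_idem buf
    · exact ih _ _ _ h

-- the two second-phase loops agree on stripped parts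
theorem pv_columns_fold_eq (parts : List (List Char))
    (h : ∀ p ∈ parts, PySem.Chars.strip p = p) :
    ∀ (acc : PySem.Dict (List Char) (List Char)),
    parts.foldl (fun columns part0 =>
      let part := PySem.Chars.strip part0
      if PySem.Chars.startswith (PySem.Chars.upper part) "PRIMARY KEY".toList then columns
      else if PySem.Chars.startswith (PySem.Chars.upper part) "FOREIGN KEY".toList then columns
      else
        match PySem.Chars.split₀Max part 1 with
        | t0 :: t1 :: _ => columns.insert t0 t1
        | _ => columns) acc
    = parts.foldl (fun columns part =>
        let u := PySem.Chars.upper part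
        if PySem.Chars.startswith u "PRIMARY KEY".toList || PySem.Chars.startswith u "FOREIGN KEY".toList then
          columns
        else
          match PySem.Chars.split₀Max part 1 with
          | t0 :: t1 :: _ => columns.insert t0 t1
          | _ => columns) acc := by
  induction parts with
  | nil => intro acc; rfl
  | cons q qs ih =>
    intro acc
    have hq : PySem.Chars.strip q = q := h q List.mem_cons_self
    have hqs : ∀ p ∈ qs, PySem.Chars.strip p = p := fun p hp => h p (List.mem_cons_of_mem _ hp)
    simp only [List.foldl_cons, hq]
    have hacc : (if PySem.Chars.startswith (PySem.Chars.upper q) "PRIMARY KEY".toList then acc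
         else if PySem.Chars.startswith (PySem.Chars.upper q) "FOREIGN KEY".toList then acc
         else
           match PySem.Chars.split₀Max q 1 with
           | t0 :: t1 :: _ => acc.insert t0 t1
           | _ => acc)
        = (if PySem.Chars.startswith (PySem.Chars.upper q) "PRIMARY KEY".toList ||
              PySem.Chars.startswith (PySem.Chars.upper q) "FOREIGN KEY".toList then acc
           else
             match PySem.Chars.split₀Max q 1 with
             | t0 :: t1 :: _ => acc.insert t0 t1
             | _ => acc) := by
      split_ifs <;> simp_all
    rw [hacc]
    exact ih hqs _

theorem pv_columns_eq (parts : List (List Char))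
    (h : ∀ p ∈ parts, PySem.Chars.strip p = p) :
    pvAColumns parts = pvBColumns parts := by
  unfold pvAColumns pvBColumns
  exact pv_columns_fold_eq parts h _

-- ===== VERDICT (by name: the statement is the Claim_ definition above) =====
theorem parse_columns_from_definition_py_spec : Claim_equal_parse_columns_from_definition_py := by
  intro table_def _
  unfold Spec_parse_columns_from_definition_py
  unfold parse_columns_from_definition_py parse_columns_from_definition_py_alt
  have hsplit : table_def.toList.splitOn ',' = table_def.toList.splitOnP (· == ',') := rfl
  obtain ⟨f0, rest, h⟩ :=
    List.exists_cons_of_ne_nil (List.splitOnP_ne_nil (· == ',') table_def.toList)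
  rw [hsplit, h]
  have hnc := pv_mem_splitOnP_no_comma table_def.toList
  rw [h] at hnc
  have hf0 : ',' ∉ f0 := hnc f0 List.mem_cons_self
  have hrest : ∀ g ∈ rest, ',' ∉ g := fun g hg => hnc g (List.mem_cons_of_mem _ hg)
  -- rewrite the scanned text as f0 followed by the glued remaining fragments
  have hcs : table_def.toList = f0 ++ pvGlue rest := by
    have := pvRecon_splitOnP table_def.toList
    rw [h] at this
    simpa [pvRecon] using this.symm
  rw [hcs]
  rw [pvAScan_append, pvAScan_no_comma f0 hf0]
  simp only [List.nil_append, Int.zero_add]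
  obtain ⟨hparts, hbuf⟩ := pv_loop_eq rest hrest [] (pvCnt f0) f0
  rw [hparts, hbuf]
  -- both sides now build the dict from the same part list; the parts are all stripped
  have hstripped : ∀ p ∈ (if PySem.Chars.strip (pvBLoop [] (pvCnt f0) f0 rest).2 = [] then
        (pvBLoop [] (pvCnt f0) f0 rest).1
      else (pvBLoop [] (pvCnt f0) f0 rest).1 ++ [PySem.Chars.strip (pvBLoop [] (pvCnt f0) f0 rest).2]),
      PySem.Chars.strip p = p := by
    have hloop := pvBLoop_parts_stripped rest [] (pvCnt f0) f0 (by simp)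
    split_ifs
    · exact hloop
    · intro p hp
      rcases List.mem_append.mp hp with h' | h'
      · exact hloop p h'
      · simp only [List.mem_singleton] at h'
        subst h'
        exact pv_strip_idem _
  rw [pv_columns_eq _ hstripped]
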